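-- pv_equiv track=rewrite | github.com/muralimadhava96-ui/Support-Inbox-Environment | inference.py | _history_classification
-- ===== SOURCE A (Python) =====
-- def _history_classification(history: list[str]) -> str | None:
--     for row in reversed(history):
--         if "classify:" not in row:
--             continue
--         value = row.split("classify:", 1)[1].strip().lower()
--         if value in {"faq", "billing", "policy"}:
--             return value
--     return None
-- ===== SOURCE B (Python) =====
-- def _history_classification(history: list[str]) -> str | None:
--     parsed = [row.split("classify:", 1)[1].strip().lower()
--               for row in history if "classify:" in row]
--     valid = [v for v in parsed if v in ("faq", "billing", "policy")]
--     return valid[-1] if valid else None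
-- ===== Notes on version B (the rewrite author's own statement) =====
-- stated objective: alternative
-- what changed: Replaces the reversed scan with early return by two staged list comprehensions (filter+parse, then filter by validity) followed by taking the last element of the resulting list.
import Mathlib
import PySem

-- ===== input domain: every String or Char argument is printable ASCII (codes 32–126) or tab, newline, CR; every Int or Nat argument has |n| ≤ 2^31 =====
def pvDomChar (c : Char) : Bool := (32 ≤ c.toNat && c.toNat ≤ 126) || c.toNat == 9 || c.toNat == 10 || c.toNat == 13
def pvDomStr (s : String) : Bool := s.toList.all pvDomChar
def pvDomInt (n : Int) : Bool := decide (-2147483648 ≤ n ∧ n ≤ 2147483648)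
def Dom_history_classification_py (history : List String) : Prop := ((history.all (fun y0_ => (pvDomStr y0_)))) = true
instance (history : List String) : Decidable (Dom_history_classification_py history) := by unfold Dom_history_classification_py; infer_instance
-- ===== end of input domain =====

-- B replaces A's reversed scan with early return by two staged comprehensions (parse, then keep valid) and takes the last element (objective: alternative decomposition).

-- ===== PORT A =====
-- the loop body of A: scan the (already reversed) list, returning at the first valid classify row
def pvAGo : List String → Option String
  | [] => none
  | row :: rest =>
    if PySem.Str.isIn "classify:" row = false then pvAGo rest
    else
      let value := PySem.Str.lower (PySem.Str.strip
        ((((PySem.Str.splitMax? row "classify:" 1).getD []).getD 1 "")))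
      if value == "faq" || value == "billing" || value == "policy" then some value
      else pvAGo rest

def history_classification_py (history : List String) : Option String :=
  pvAGo history.reverse

-- ===== PORT B =====
-- row.split("classify:", 1)[1].strip().lower()
def pvParse (row : String) : String :=
  PySem.Str.lower (PySem.Str.strip
    ((((PySem.Str.splitMax? row "classify:" 1).getD []).getD 1 "")))

-- v in ("faq", "billing", "policy")
def pvIsValid (v : String) : Bool :=
  v == "faq" || v == "billing" || v == "policy"

def history_classification_py_alt (history : List String) : Option String :=
  let parsed := (history.filter (fun row => PySem.Str.isIn "classify:" row)).map pvParse
  let valid := parsed.filter pvIsValid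
  valid.getLast?

-- ===== PRECONDITION & SPEC =====
def Spec_history_classification_py (history : List String) (out : Option String) : Prop := out = history_classification_py_alt history
instance (history : List String) (out : Option String) : Decidable (Spec_history_classification_py history out) := by unfold Spec_history_classification_py; infer_instance

-- ===== CLAIM (what is proved, stated in full; the proofs are below) =====
def Claim_equal_history_classification_py : Prop := ∀ (history : List String), Dom_history_classification_py history → Spec_history_classification_py history (history_classification_py history)

-- ===== LEMMAS AND PROOFS =====
-- A's reverse scan with early return is head? of the staged pipeline applied to the same (reversed) list.
theorem pvAGo_eq_head? (m : List String) :
    pvAGo m =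
      (((m.filter (fun row => PySem.Str.isIn "classify:" row)).map pvParse).filter pvIsValid).head? := by
  induction m with
  | nil => simp [pvAGo]
  | cons row rest ih =>
    rw [pvAGo]
    by_cases hin : PySem.Str.isIn "classify:" row
    · by_cases hval : pvIsValid (pvParse row)
      · have hval' : (pvParse row == "faq" || pvParse row == "billing" || pvParse row == "policy") = true := by
          simpa [pvIsValid] using hval
        simp only [hin, Bool.true_eq_false, if_false, List.filter_cons_of_pos hin,
          List.map_cons, List.filter_cons_of_pos hval, List.head?_cons]
        rw [show pvParse row = PySem.Str.lower (PySem.Str.strip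
          ((((PySem.Str.splitMax? row "classify:" 1).getD []).getD 1 ""))) from rfl] at hval'
        rw [if_pos hval']
        rfl
      · have hval' : ¬ ((pvParse row == "faq" || pvParse row == "billing" || pvParse row == "policy") = true) := by
          simpa [pvIsValid] using hval
        simp only [hin, Bool.true_eq_false, if_false, List.filter_cons_of_pos hin,
          List.map_cons, List.filter_cons_of_neg hval]
        rw [show pvParse row = PySem.Str.lower (PySem.Str.strip
          ((((PySem.Str.splitMax? row "classify:" 1).getD []).getD 1 ""))) from rfl] at hval'
        rw [if_neg hval']
        exact ih
    · rw [List.filter_cons_of_neg hin, if_pos (by simpa using hin)]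
      exact ih

-- ===== VERDICT (by name: the statement is the Claim_ definition above) =====
theorem history_classification_py_spec : Claim_equal_history_classification_py := by
  intro history _
  unfold Spec_history_classification_py history_classification_py history_classification_py_alt
  rw [pvAGo_eq_head?]
  simp only [List.getLast?_eq_head?_reverse, List.filter_reverse, List.map_reverse]
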